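-- pv_equiv track=rewrite | github.com/Aggushub/TinyLogics | 20. Light-Intensity.py | finalGlow
-- ===== SOURCE A (Python) =====
-- def finalGlow(lamps, k):
--     active = [lamps[0]]  # first lamp always active
--
--     for i in range(1, len(lamps)):
--         if abs(lamps[i] - active[-1]) <= k:
--             active.append(lamps[i])
--         else:
--             active = [lamps[i]]
--
--     # return total glow (sum of active intensities)
--     return sum(active)
-- ===== SOURCE B (Python) =====
-- def finalGlow(lamps, k):
--     total = lamps[-1]
--     i = len(lamps) - 1
--     while i > 0 and abs(lamps[i] - lamps[i - 1]) <= k: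
--         total += lamps[i - 1]
--         i -= 1
--     return total
-- ===== Notes on version B (the rewrite author's own statement) =====
-- stated objective: faster
-- what changed: B walks the list backward from the last lamp with a scalar accumulator and stops at the first gap > k, instead of A's forward scan over the whole list that rebuilds an 'active' list on every break and sums it at the end.
import Mathlib
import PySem

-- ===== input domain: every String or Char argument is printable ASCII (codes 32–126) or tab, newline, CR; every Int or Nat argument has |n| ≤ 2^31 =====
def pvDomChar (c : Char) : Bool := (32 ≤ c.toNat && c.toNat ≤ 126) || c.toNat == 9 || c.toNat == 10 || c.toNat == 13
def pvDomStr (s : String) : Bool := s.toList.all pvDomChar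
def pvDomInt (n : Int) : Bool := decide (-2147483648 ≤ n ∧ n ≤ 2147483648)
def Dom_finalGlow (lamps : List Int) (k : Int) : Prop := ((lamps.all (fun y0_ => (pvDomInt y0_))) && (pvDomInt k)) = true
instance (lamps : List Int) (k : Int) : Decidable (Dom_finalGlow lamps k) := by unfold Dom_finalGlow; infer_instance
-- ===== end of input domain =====

-- B replaces A's forward scan with its rebuilt 'active' list by a backward scalar-accumulator
-- walk over the final run (alternative decomposition; same asymptotic cost, O(1) extra space).


-- ===== PORT A =====
-- step of A's for-loop: compare lamps[i] with active[-1], extend or restart 'active'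
def finalGlowStep (lamps : List Int) (k : Int) (active : List Int) (i : Int) : List Int :=
  if |PySem.List.pyGetD lamps i 0 - PySem.List.pyGetD active (-1) 0| ≤ k then
    active ++ [PySem.List.pyGetD lamps i 0]
  else
    [PySem.List.pyGetD lamps i 0]

def finalGlow (lamps : List Int) (k : Int) : Int :=
  -- lamps[0] / active[-1] are in range under Pre_ (lamps ≠ []), so pyGetD is exact here
  ((PySem.List.pyRange 1 (PySem.List.len lamps) 1).foldl
      (finalGlowStep lamps k) [PySem.List.pyGetD lamps 0 0]).sum

-- ===== PORT B =====
-- B's while-loop: i counts down; add lamps[i-1] while the gap stays ≤ k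
def finalGlowLoop (lamps : List Int) (k : Int) : Nat → Int → Int
  | 0, total => total
  | Nat.succ j, total =>
    if |PySem.List.pyGetD lamps ((j : Int) + 1) 0 - PySem.List.pyGetD lamps (j : Int) 0| ≤ k then
      finalGlowLoop lamps k j (total + PySem.List.pyGetD lamps (j : Int) 0)
    else total

def finalGlow_alt (lamps : List Int) (k : Int) : Int :=
  finalGlowLoop lamps k (lamps.length - 1) (PySem.List.pyGetD lamps (-1) 0)

-- ===== PRECONDITION & SPEC =====
-- A raises IndexError (lamps[0]) on the empty list; B raises there too (lamps[-1]).
def Pre_finalGlow (lamps : List Int) (k : Int) : Prop := lamps ≠ []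
instance (lamps : List Int) (k : Int) : Decidable (Pre_finalGlow lamps k) := by unfold Pre_finalGlow; infer_instance
def pvWitness_finalGlow : List Int × Int := ([3, 5, 20], 4)

def Spec_finalGlow (lamps : List Int) (k : Int) (out : Int) : Prop := out = finalGlow_alt lamps k
instance (lamps : List Int) (k : Int) (out : Int) : Decidable (Spec_finalGlow lamps k out) := by unfold Spec_finalGlow; infer_instance

-- ===== CLAIM (what is proved, stated in full; the proofs are below) =====
def Claim_equal_finalGlow : Prop := ∀ (lamps : List Int) (k : Int), Dom_finalGlow lamps k → Pre_finalGlow lamps k → Spec_finalGlow lamps k (finalGlow lamps k)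

-- ===== LEMMAS AND PROOFS =====

-- sum of the k-chain starting at a and extending through l (l is the earlier part, reversed)
def chainSum (k : Int) : Int → List Int → Int
  | a, [] => a
  | a, b :: t => if |a - b| ≤ k then a + chainSum k b t else a

-- B's loop never reads indices above i, so a suffix of the list is irrelevant
theorem finalGlowLoop_append (k : Int) (ws : List Int) :
    ∀ (i : Nat) (zs : List Int) (t : Int), i < zs.length →
      finalGlowLoop (zs ++ ws) k i t = finalGlowLoop zs k i t := by
  intro i
  induction i with
  | zero => intro zs t _; rfl
  | succ j ih =>
    intro zs t h
    have h1 : ((j : Int) + 1) = ((j + 1 : Nat) : Int) := by push_cast; ring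
    simp only [finalGlowLoop, h1, PySem.List.pyGetD_natCast,
      List.getD_append _ _ _ _ (by omega : j + 1 < zs.length),
      List.getD_append _ _ _ _ (by omega : j < zs.length)]
    split
    · exact ih zs _ (by omega)
    · rfl

theorem finalGlowLoop_add (lamps : List Int) (k : Int) :
    ∀ (i : Nat) (c t : Int), finalGlowLoop lamps k i (c + t) = c + finalGlowLoop lamps k i t := by
  intro i
  induction i with
  | zero => intro c t; rfl
  | succ j ih =>
    intro c t
    simp only [finalGlowLoop]
    split
    · rw [add_assoc, ih]
    · rfl

theorem finalGlowLoop_chain (k : Int) :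
    ∀ (pre : List Int) (x : Int),
      finalGlowLoop (pre ++ [x]) k pre.length x = chainSum k x pre.reverse := by
  intro pre
  induction pre using List.reverseRecOn with
  | nil => intro x; rfl
  | append_singleton q y ih =>
    intro x
    have hlen : (q ++ [y]).length = q.length + 1 := by simp
    have hx : PySem.List.pyGetD ((q ++ [y]) ++ [x]) ((q.length : Int) + 1) 0 = x := by
      have h1 : ((q.length : Int) + 1) = (((q ++ [y]).length : Nat) : Int) := by
        rw [hlen]; push_cast; ring
      rw [h1, PySem.List.pyGetD_natCast]
      simp
    have hy : PySem.List.pyGetD ((q ++ [y]) ++ [x]) ((q.length : Int)) 0 = y := by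
      rw [PySem.List.pyGetD_eq_getElem _ 0 (by omega) (by simp),
        List.getElem_append_left (by simp)]
      simp
    rw [hlen]
    simp only [finalGlowLoop, hx, hy, List.reverse_append, List.reverse_singleton,
      List.singleton_append, chainSum]
    by_cases hk : |x - y| ≤ k
    · rw [if_pos hk, if_pos hk,
        finalGlowLoop_append k [x] q.length (q ++ [y]) _ (by simp),
        finalGlowLoop_add, ih y]
    · rw [if_neg hk, if_neg hk]

-- ----- A side -----

-- the fold over range(1, len) reads only indices < zs.length, so a trailing element is irrelevant
theorem foldA_append (k : Int) (zs : List Int) (w : Int) (init : List Int) :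
    (PySem.List.pyRange 1 (zs.length : Int) 1).foldl (finalGlowStep (zs ++ [w]) k) init =
    (PySem.List.pyRange 1 (zs.length : Int) 1).foldl (finalGlowStep zs k) init := by
  apply PySem.List.foldl_congr_mem
  intro acc i hi
  rw [PySem.List.mem_pyRange_one] at hi
  unfold finalGlowStep
  have : PySem.List.pyGetD (zs ++ [w]) i 0 = PySem.List.pyGetD zs i 0 := by
    rw [PySem.List.pyGetD_eq_getElem (zs ++ [w]) 0 (by omega) (by simp; omega),
        PySem.List.pyGetD_eq_getElem zs 0 (by omega) (by omega),
        List.getElem_append_left (by omega)]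
  rw [this]

-- invariant of A's fold: 'active' ends with the last processed lamp and sums to the chain
theorem foldA_chain (k : Int) :
    ∀ (pre : List Int) (x : Int),
      (let L := (PySem.List.pyRange 1 (((pre ++ [x]).length : Nat) : Int) 1).foldl
          (finalGlowStep (pre ++ [x]) k) [PySem.List.pyGetD (pre ++ [x]) 0 0]
       PySem.List.pyGetD L (-1) 0 = x ∧ L.sum = chainSum k x pre.reverse) := by
  intro pre
  induction pre using List.reverseRecOn with
  | nil =>
    intro x
    refine ⟨rfl, ?_⟩
    simp [chainSum, PySem.List.pyGetD_zero_cons, PySem.List.pyRange_one_eq_nil]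
  | append_singleton q y ih =>
    intro x
    have hlen : ((q ++ [y]) ++ [x]).length = (q ++ [y]).length + 1 := by simp
    have hrange : PySem.List.pyRange 1 ((((q ++ [y]) ++ [x]).length : Nat) : Int) 1 =
        PySem.List.pyRange 1 (((q ++ [y]).length : Nat) : Int) 1 ++ [((q ++ [y]).length : Int)] := by
      have hcast : (((q ++ [y]).length + 1 : Nat) : Int) = ((q ++ [y]).length : Int) + 1 := by
        push_cast; ring
      rw [hlen, hcast]
      exact PySem.List.pyRange_one_succ_right
        (by exact_mod_cast (by simp : 1 ≤ (q ++ [y]).length))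
    have h0 : PySem.List.pyGetD ((q ++ [y]) ++ [x]) 0 0 =
        PySem.List.pyGetD (q ++ [y]) 0 0 := by
      rw [PySem.List.pyGetD_zero, PySem.List.pyGetD_zero, List.append_assoc]
      cases q <;> rfl
    obtain ⟨ihlast, ihsum⟩ := ih y
    -- fold over the shorter range ignores the appended [x]
    have htrunc : (PySem.List.pyRange 1 (((q ++ [y]).length : Nat) : Int) 1).foldl
          (finalGlowStep ((q ++ [y]) ++ [x]) k) [PySem.List.pyGetD ((q ++ [y]) ++ [x]) 0 0] =
        (PySem.List.pyRange 1 (((q ++ [y]).length : Nat) : Int) 1).foldl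
          (finalGlowStep (q ++ [y]) k) [PySem.List.pyGetD (q ++ [y]) 0 0] := by
      rw [h0]; exact foldA_append k (q ++ [y]) x _
    have hx : PySem.List.pyGetD ((q ++ [y]) ++ [x]) (((q ++ [y]).length : Nat) : Int) 0 = x := by
      rw [PySem.List.pyGetD_natCast]; simp
    simp only [hrange, List.foldl_append, List.foldl_cons, List.foldl_nil, htrunc]
    set L0 := (PySem.List.pyRange 1 (((q ++ [y]).length : Nat) : Int) 1).foldl
        (finalGlowStep (q ++ [y]) k) [PySem.List.pyGetD (q ++ [y]) 0 0] with hL0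
    unfold finalGlowStep
    rw [hx, ihlast]
    simp only [List.reverse_append, List.reverse_singleton, List.singleton_append, chainSum]
    by_cases hk : |x - y| ≤ k
    · rw [if_pos hk, if_pos hk]
      constructor
      · exact PySem.List.pyGetD_neg_one_append_singleton L0 x 0
      · rw [List.sum_append, ihsum]; simp [add_comm]
    · rw [if_neg hk, if_neg hk]
      exact ⟨PySem.List.pyGetD_neg_one_append_singleton [] x 0, by simp⟩

theorem finalGlow_spec : Claim_equal_finalGlow := by
  intro lamps k _ hpre
  unfold Spec_finalGlow finalGlow finalGlow_alt
  obtain ⟨pre, x, rfl⟩ := List.eq_nil_or_concat lamps |>.resolve_left hpre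
  simp only [List.concat_eq_append]
  obtain ⟨_, hsum⟩ := foldA_chain k pre x
  have hlen1 : (pre ++ [x]).length - 1 = pre.length := by simp
  rw [PySem.List.len_eq, hsum, hlen1,
    PySem.List.pyGetD_neg_one_append_singleton pre x 0, finalGlowLoop_chain]
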